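-- pv_equiv track=rewrite | github.com/onur-sahin/Yargitay_Verileri_Selenium | my_tools.py | convert_title
-- ===== SOURCE A (Python) =====
-- def   convert_title(metin):
--    list_1 = [i for i in metin]
--
--    for i in enumerate(list_1):
--
--       if(len(i[1]) == 0):
--          continue
--
--       if(i[1] =='\t' ):
--          list_1[i[0]] = " " + '\t' + " "
--
--    list = "".join(list_1)
--
--    list = list.split(" ")
--
--    for i in enumerate(list):
--
--       if(len(i[1]) == 0):
--          continue
--
--       elif( i[1][0] == "i"):
--          list[i[0]] = "İ" + list[i[0]][1:]
--
--       elif( i[1][0] == "ı"):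
--          list[i[0]] = "I" + list[i[0]][1:]
--
--       else:
--          list[i[0]] = str.upper(list[i[0]][0]) + list[i[0]][1:]
--
--
--    return " ".join(list)
-- ===== SOURCE B (Python) =====
-- def convert_title(metin):
--     out = []
--     at_start = True
--     for ch in metin:
--         if ch == '\t':
--             out.append(' \t ')
--             at_start = True
--         elif ch == ' ':
--             out.append(' ')
--             at_start = True
--         else:
--             if at_start:
--                 if ch == 'i':
--                     out.append('\u0130')
--                 elif ch == '\u0131':
--                     out.append('I')
--                 else:
--                     out.append(ch.upper())
--             else:
--                 out.append(ch)
--             at_start = False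
--     return ''.join(out)
-- ===== Notes on version B (the rewrite author's own statement) =====
-- stated objective: simpler
-- what changed: A pads each tab with spaces, joins, splits on single spaces and capitalizes each token's first character in a second pass; B does one left-to-right scan over the characters with an at-token-start flag, capitalizing in place.
import Mathlib
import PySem

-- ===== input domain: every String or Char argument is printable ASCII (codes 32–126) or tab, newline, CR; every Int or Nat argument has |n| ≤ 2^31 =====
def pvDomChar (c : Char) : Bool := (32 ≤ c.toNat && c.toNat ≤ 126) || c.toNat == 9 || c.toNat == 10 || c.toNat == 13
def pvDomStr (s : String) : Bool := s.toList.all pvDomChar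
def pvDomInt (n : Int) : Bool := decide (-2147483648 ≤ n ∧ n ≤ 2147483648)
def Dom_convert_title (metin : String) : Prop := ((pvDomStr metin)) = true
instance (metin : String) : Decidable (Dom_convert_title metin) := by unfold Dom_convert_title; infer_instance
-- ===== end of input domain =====

-- B replaces A's expand-tabs / split(" ") / capitalize-each-token / join pipeline by a single
-- left-to-right character scan carrying an "at token start" flag (objective: simpler one-pass decomposition).


-- ===== PORT A =====
-- the body of A's second loop, applied to each token of the split (A's branch order kept;
-- t[0] is t.headI, t[1:] is t.tail — only used when the length-0 guard failed)
def capA (t : List Char) : List Char :=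
  if t.length = 0 then t
  else if t.headI = 'i' then 'İ' :: t.tail
  else if t.headI = 'ı' then 'I' :: t.tail
  else PySem.Chars.upperChar t.headI :: t.tail

def convert_title (metin : String) : String :=
  -- list_1 = [i for i in metin]  (a list of 1-character strings)
  let list1 : List (List Char) := metin.toList.map (fun c => [c])
  -- first enumerate loop: index-wise update = map (the len == 0 'continue' kept)
  let list1 := list1.map (fun s => if s.length = 0 then s else if s = ['\t'] then [' ', '\t', ' '] else s)
  -- "".join(list_1)
  let joined := PySem.Chars.join [] list1
  -- .split(" ")
  let toks := PySem.Chars.splitOn joined [' ']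
  -- second enumerate loop: index-wise update = map
  let toks := toks.map capA
  -- " ".join(list)
  String.ofList (PySem.Chars.join [' '] toks)

-- ===== PORT B =====
def capB (c : Char) : Char :=
  if c = 'i' then 'İ' else if c = 'ı' then 'I' else PySem.Chars.upperChar c

-- Source B's loop: one pass over the characters with an at-token-start flag
def goB : List Char → Bool → List Char
  | [], _ => []
  | c :: rest, atStart =>
    if c = '\t' then ' ' :: '\t' :: ' ' :: goB rest true
    else if c = ' ' then ' ' :: goB rest true
    else (if atStart then capB c else c) :: goB rest false

def convert_title_alt (metin : String) : String :=
  String.ofList (goB metin.toList true)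

-- ===== PRECONDITION & SPEC =====
def Spec_convert_title (metin : String) (out : String) : Prop := out = convert_title_alt metin
instance (metin : String) (out : String) : Decidable (Spec_convert_title metin out) := by unfold Spec_convert_title; infer_instance

-- ===== CLAIM (what is proved, stated in full; the proofs are below) =====
def Claim_equal_convert_title : Prop := ∀ (metin : String), Dom_convert_title metin → Spec_convert_title metin (convert_title metin)

-- ===== LEMMAS AND PROOFS =====

-- split on a single space, in head/tail form ((sp l).1 = first token, (sp l).2 = remaining tokens)
def sp : List Char → List Char × List (List Char)
  | [] => ([], [])
  | c :: r => let p := sp r; if c = ' ' then ([], p.1 :: p.2) else (c :: p.1, p.2)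

-- B's scan restated on the already-tab-expanded character list (no tab branch needed there)
def P : List Char → Bool → List Char
  | [], _ => []
  | c :: r, b => if c = ' ' then ' ' :: P r true else (if b then capB c else c) :: P r false

theorem go_split (fuel : Nat) : ∀ (l cur : List Char) (acc : List (List Char)),
    l.length < fuel →
    PySem.Chars.splitOn.go [' '] fuel l cur acc
      = acc.reverse ++ (cur.reverse ++ (sp l).1) :: (sp l).2 := by
  induction fuel with
  | zero => intro l cur acc h; omega
  | succ n ih =>
    intro l cur acc h
    cases l with
    | nil => simp [PySem.Chars.splitOn.go, sp]
    | cons c r =>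
      by_cases hc : c = ' '
      · subst hc
        rw [PySem.Chars.splitOn.go]
        simp only [List.isPrefixOf, List.length_cons] at h ⊢
        simp only [beq_self_eq_true, Bool.true_and, if_true,
          List.drop_succ_cons, List.length_nil, List.drop_zero]
        rw [ih r [] _ (by omega)]
        simp [sp]
      · rw [PySem.Chars.splitOn.go]
        have hp : [' '].isPrefixOf (c :: r) = false := by
          simp [List.isPrefixOf]; intro hcc; exact hc (by simpa using hcc.symm)
        simp only [hp, Bool.false_eq_true, if_false]
        rw [ih r (c :: cur) _ (by simp at h; omega)]
        simp [sp, hc]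

theorem splitOn_sp (l : List Char) :
    PySem.Chars.splitOn l [' '] = (sp l).1 :: (sp l).2 := by
  rw [PySem.Chars.splitOn, go_split] <;> simp

theorem capA_cons (c : Char) (h : List Char) : capA (c :: h) = capB c :: h := by
  simp [capA, capB]; split_ifs <;> rfl

theorem join_cons_head (x : Char) (p : List Char) (ps : List (List Char)) :
    PySem.Chars.join [' '] ((x :: p) :: ps) = x :: PySem.Chars.join [' '] (p :: ps) := by
  cases ps with
  | nil => simp [PySem.Chars.join, List.intercalate]
  | cons q qs => rw [PySem.Chars.join_cons_cons, PySem.Chars.join_cons_cons]; simp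

theorem join_nil_head (ps : List (List Char)) (q : List Char) :
    PySem.Chars.join [' '] ([] :: q :: ps) = ' ' :: PySem.Chars.join [' '] (q :: ps) := by
  rw [PySem.Chars.join_cons_cons]; simp

theorem join_sp (l : List Char) :
    PySem.Chars.join [' '] (capA (sp l).1 :: (sp l).2.map capA) = P l true ∧
    PySem.Chars.join [' '] ((sp l).1 :: (sp l).2.map capA) = P l false := by
  induction l with
  | nil => constructor <;> simp [sp, capA, P, PySem.Chars.join, List.intercalate]
  | cons c r ih =>
    by_cases hc : c = ' '
    · subst hc
      have hsp : sp (' ' :: r) = ([], (sp r).1 :: (sp r).2) := by simp [sp]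
      have hP : ∀ b, P (' ' :: r) b = ' ' :: P r true := by intro b; simp [P]
      rw [hsp]
      constructor
      · rw [hP, show capA [] = ([] : List Char) from rfl, List.map_cons, join_nil_head, ih.1]
      · rw [hP, List.map_cons, join_nil_head, ih.1]
    · have hsp : sp (c :: r) = (c :: (sp r).1, (sp r).2) := by simp [sp, hc]
      have hP : ∀ b, P (c :: r) b = (if b then capB c else c) :: P r false := by
        intro b; simp [P, hc]
      rw [hsp]
      constructor
      · rw [hP, capA_cons, join_cons_head, ih.2]; simp
      · rw [hP, join_cons_head, ih.2]; simp

-- tab expansion at the character-list level (what A's first loop + "".join produce)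
def expandT (cs : List Char) : List Char :=
  (cs.map (fun c => if c = '\t' then [' ', '\t', ' '] else [c])).flatten

theorem goB_P (cs : List Char) : ∀ b, goB cs b = P (expandT cs) b := by
  induction cs with
  | nil => intro b; simp [goB, expandT, P]
  | cons c r ih =>
    intro b
    by_cases ht : c = '\t'
    · subst ht
      simp only [expandT, List.map_cons, List.flatten_cons, if_pos rfl] at *
      show goB _ b = P (' ' :: '\t' :: ' ' :: _) b
      simp only [goB, P, if_pos rfl]
      have : capB '\t' = '\t' := by decide
      simp [P, this, ih]
    · by_cases hs : c = ' '
      · subst hs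
        simp only [expandT, List.map_cons, List.flatten_cons] at *
        simp [goB, P, ih]
      · simp only [expandT, List.map_cons, List.flatten_cons, if_neg ht] at *
        simp [goB, P, ih, ht, hs]

theorem join_empty_sep (ps : List (List Char)) : PySem.Chars.join [] ps = ps.flatten := by
  induction ps with
  | nil => rfl
  | cons q qs ih =>
    cases qs with
    | nil => simp [PySem.Chars.join, List.intercalate]
    | cons q' qs' => rw [PySem.Chars.join_cons_cons]; simp [ih]

theorem list1_map (cs : List Char) :
    (cs.map (fun c => [c])).map
        (fun s : List Char => if s.length = 0 then s else if s = ['\t'] then [' ', '\t', ' '] else s)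
      = cs.map (fun c => if c = '\t' then [' ', '\t', ' '] else [c]) := by
  rw [List.map_map]
  apply List.map_congr_left
  intro c _
  by_cases ht : c = '\t' <;> simp [ht]

-- ===== VERDICT (by name: the statement is the Claim_ definition above) =====
theorem convert_title_spec : Claim_equal_convert_title := by
  intro metin _
  unfold Spec_convert_title convert_title convert_title_alt
  dsimp only
  congr 1
  rw [list1_map, join_empty_sep]
  rw [splitOn_sp, List.map_cons, (join_sp _).1, goB_P]
  rfl
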